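-- pv_equiv track=rewrite | github.com/pyoko-dev/ComfyUI-EasyIllustrious | src/core/anime_scene_system.py | _dedupe_against
-- ===== SOURCE A (Python) =====
-- from typing import Dict, List, Tuple
--
-- def _dedupe_against(text: str, tokens: List[str]) -> List[str]:
--     if not text:
--         return tokens
--     lower = text.lower()
--     out = []
--     for t in tokens:
--         if t and t.lower() not in lower:
--             out.append(t)
--     return out
-- ===== SOURCE B (Python) =====
-- from typing import List
--
-- def _dedupe_against(text: str, tokens: List[str]) -> List[str]:
--     if not text:
--         return tokens
--     lower = text.lower()
--     n = len(lower)
--     lengths = sorted({len(t) for t in tokens if t})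
--     subs = set()
--     for L in lengths:
--         for i in range(n - L + 1):
--             subs.add(lower[i:i + L])
--     return [t for t in tokens if t and t.lower() not in subs]
-- ===== Notes on version B (the rewrite author's own statement) =====
-- stated objective: faster
-- what changed: B indexes the lowered text once by building a hash set of all its substrings of the (distinct) token lengths, then filters tokens by O(1) expected set lookups instead of running a fresh substring scan of the whole text for every token.
import Mathlib
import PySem

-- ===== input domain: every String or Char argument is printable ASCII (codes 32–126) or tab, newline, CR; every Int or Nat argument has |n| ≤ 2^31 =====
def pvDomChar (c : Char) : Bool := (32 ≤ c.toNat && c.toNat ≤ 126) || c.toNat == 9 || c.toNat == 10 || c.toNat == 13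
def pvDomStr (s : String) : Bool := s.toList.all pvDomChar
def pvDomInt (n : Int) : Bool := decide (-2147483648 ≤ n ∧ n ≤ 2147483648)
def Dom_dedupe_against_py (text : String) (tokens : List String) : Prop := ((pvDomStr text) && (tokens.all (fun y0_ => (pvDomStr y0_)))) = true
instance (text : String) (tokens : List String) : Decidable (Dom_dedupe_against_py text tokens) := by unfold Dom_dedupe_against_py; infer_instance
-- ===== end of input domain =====

-- B indexes the lowered text once with a set of all its substrings of the distinct token
-- lengths and filters tokens by set lookups; A rescans the text for each token. Same results.

-- ===== PORT A =====
def dedupe_against_py (text : String) (tokens : List String) : List String :=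
  if text = "" then tokens
  else
    let lower := PySem.Str.lower text
    tokens.foldl (fun out t =>
      if !(t == "") && !(PySem.Str.isIn (PySem.Str.lower t) lower) then out ++ [t] else out) []

-- ===== PORT B =====
def dedupe_against_py_alt (text : String) (tokens : List String) : List String :=
  if text = "" then tokens
  else
    let lower := PySem.Str.lower text
    let n := PySem.Str.len lower
    let lengths := PySem.List.sorted
      (PySem.Set.ofList ((tokens.filter (fun t => !(t == ""))).map PySem.Str.len)) (fun x => x) false
    let subs : PySem.Set String := lengths.foldl (fun s L =>
      (PySem.List.pyRange 0 (n - L + 1)).foldl (fun s i =>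
        PySem.Set.add s (PySem.Str.slice lower (some i) (some (i + L)))) s) PySem.Set.empty
    tokens.filter (fun t => !(t == "") && !(PySem.Set.contains subs (PySem.Str.lower t)))

-- ===== PRECONDITION & SPEC =====
def Spec_dedupe_against_py (text : String) (tokens : List String) (out : List String) : Prop := out = dedupe_against_py_alt text tokens
instance (text : String) (tokens : List String) (out : List String) : Decidable (Spec_dedupe_against_py text tokens out) := by unfold Spec_dedupe_against_py; infer_instance

-- ===== CLAIM (what is proved, stated in full; the proofs are below) =====
def Claim_equal_dedupe_against_py : Prop := ∀ (text : String) (tokens : List String), Dom_dedupe_against_py text tokens → Spec_dedupe_against_py text tokens (dedupe_against_py text tokens)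

-- ===== LEMMAS AND PROOFS =====

-- membership in B's inner loop (add one window for every start index)
theorem mem_inner_fold (low : String) (L : Int) (rng : List Int) (s0 : PySem.Set String)
    (x : String) :
    x ∈ rng.foldl (fun s i =>
        PySem.Set.add s (PySem.Str.slice low (some i) (some (i + L)))) s0 ↔
      x ∈ s0 ∨ ∃ i ∈ rng, PySem.Str.slice low (some i) (some (i + L)) = x := by
  induction rng generalizing s0 with
  | nil => simp
  | cons a tl ih =>
    simp only [List.foldl_cons, ih, PySem.Set.mem_add, List.mem_cons]
    constructor
    · rintro (⟨h | h⟩ | ⟨i, hi, hx⟩)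
      · exact Or.inl h
      · exact Or.inr ⟨a, Or.inl rfl, h.symm⟩
      · exact Or.inr ⟨i, Or.inr hi, hx⟩
    · rintro (h | ⟨i, (rfl | hi), hx⟩)
      · exact Or.inl (Or.inl h)
      · exact Or.inl (Or.inr hx.symm)
      · exact Or.inr ⟨i, hi, hx⟩

-- membership in B's substring index
theorem mem_subs (low : String) (n : Int) (lens : List Int) (s0 : PySem.Set String)
    (x : String) :
    x ∈ lens.foldl (fun s L =>
        (PySem.List.pyRange 0 (n - L + 1)).foldl (fun s i =>
          PySem.Set.add s (PySem.Str.slice low (some i) (some (i + L)))) s) s0 ↔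
      x ∈ s0 ∨ ∃ L ∈ lens, ∃ i ∈ PySem.List.pyRange 0 (n - L + 1),
        PySem.Str.slice low (some i) (some (i + L)) = x := by
  induction lens generalizing s0 with
  | nil => simp
  | cons a tl ih =>
    simp only [List.foldl_cons, ih, mem_inner_fold, List.mem_cons]
    constructor
    · rintro (⟨h | ⟨i, hi, hx⟩⟩ | ⟨L, hL, hw⟩)
      · exact Or.inl h
      · exact Or.inr ⟨a, Or.inl rfl, i, hi, hx⟩
      · exact Or.inr ⟨L, Or.inr hL, hw⟩
    · rintro (h | ⟨L, (rfl | hL), hw⟩)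
      · exact Or.inl (Or.inl h)
      · exact Or.inl (Or.inr hw)
      · exact Or.inr ⟨L, hL, hw⟩

-- the length of a lowered string equals the length of the string
theorem len_lower (t : String) : PySem.Str.len (PySem.Str.lower t) = PySem.Str.len t := by
  simp [PySem.Str.len_eq, PySem.Str.toList_lower, PySem.Chars.lower]

-- a window slice, list-level
theorem slice_window (low : String) (i L : Nat) :
    (PySem.Str.slice low (some (i : Int)) (some ((i : Int) + (L : Int)))).toList =
      (low.toList.drop i).take L := by
  have : ((i : Int) + (L : Int)) = ((i + L : Nat) : Int) := by push_cast; ring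
  rw [this, PySem.Str.toList_slice]
  show PySem.List.slice low.toList (some (i : Int)) (some ((i + L : Nat) : Int)) = _
  rw [PySem.List.slice_natCast]
  congr 1
  omega

-- any slice of a list is a contiguous infix of it
theorem slice_isInfix {α : Type} (xs : List α) (a b : Option Int) :
    PySem.List.slice xs a b <:+: xs := by
  unfold PySem.List.slice
  exact ((List.take_prefix _ _).isInfix).trans ((List.drop_suffix _ _).isInfix)

-- the crux: for a token whose length is indexed, A's substring scan and B's set lookup agree
theorem isIn_iff_mem_subs (low : String) (lens : List Int) (t : String)
    (hlen : PySem.Str.len t ∈ lens) :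
    PySem.Str.isIn (PySem.Str.lower t) low = true ↔
      ∃ L ∈ lens, ∃ i ∈ PySem.List.pyRange 0 (PySem.Str.len low - L + 1),
        PySem.Str.slice low (some i) (some (i + L)) = PySem.Str.lower t := by
  constructor
  · intro h
    rw [PySem.Str.isIn_iff_infix] at h
    obtain ⟨pre, suf, hsplit⟩ := h
    set tl := (PySem.Str.lower t).toList with htl
    have hlt : PySem.Str.len t = (tl.length : Int) := by
      rw [← len_lower t, PySem.Str.len_eq]
    have hlow : low.toList.length = pre.length + tl.length + suf.length := by
      rw [← hsplit]; simp; omega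
    refine ⟨PySem.Str.len t, hlen, (pre.length : Int), ?_, ?_⟩
    · rw [PySem.List.mem_pyRange_one, PySem.Str.len_eq, hlt]
      constructor
      · positivity
      · omega
    · rw [hlt]
      apply String.ext
      rw [slice_window low pre.length tl.length, ← hsplit]
      simp [htl, PySem.Str.toList_lower]
  · rintro ⟨L, _, i, _, hx⟩
    rw [PySem.Str.isIn_iff_infix, ← hx, PySem.Str.toList_slice]
    exact slice_isInfix low.toList _ _

-- ===== VERDICT (by name: the statement is the Claim_ definition above) =====
theorem dedupe_against_py_spec : Claim_equal_dedupe_against_py := by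
  intro text tokens _dom
  unfold Spec_dedupe_against_py dedupe_against_py dedupe_against_py_alt
  by_cases h : text = ""
  · simp [h]
  · simp only [h, if_false]
    rw [PySem.List.foldl_append_if_eq_filter]
    rw [List.nil_append]
    apply List.filter_congr
    intro t ht
    by_cases he : t = ""
    · simp [he]
    · have hbe : (t == "") = false := by simp [he]
      simp only [hbe, Bool.not_false, Bool.true_and]
      congr 1
      have hlen : PySem.Str.len t ∈ PySem.List.sorted
          (PySem.Set.ofList ((tokens.filter (fun t => !(t == ""))).map PySem.Str.len))
          (fun x => x) false := by
        rw [(PySem.List.sorted_perm _ _ _).mem_iff, PySem.Set.mem_ofList]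
        exact List.mem_map.mpr ⟨t, List.mem_filter.mpr ⟨ht, by simp [he]⟩, rfl⟩
      rw [Bool.eq_iff_iff, isIn_iff_mem_subs _ _ _ hlen, PySem.Set.contains_iff, mem_subs]
      simp [PySem.Set.empty]
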